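-- pv_equiv track=rewrite | github.com/elpinkypie/hacker-rank-tasks | optimizing-box-weights.py | minimalHeaviestSetA
-- ===== SOURCE A (Python) =====
-- from typing import List
--
-- def minimalHeaviestSetA(arr: List[int]) -> List[int]:
--     # Sort the array in descending order
--     arr.sort(reverse=True)
--
--     total_sum = sum(arr)
--     sum_A = 0
--     subset_A = []
--
--     # Add elements to subset A until its sum > remaining sum
--     for number in arr:
--         sum_A += number
--         subset_A.append(number)
--         if sum_A > total_sum - sum_A:
--             break
--
--     # Return subset A in sorted order
--     return sorted(subset_A)
-- ===== SOURCE B (Python) =====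
-- from typing import List
--
-- def minimalHeaviestSetA(arr: List[int]) -> List[int]:
--     # Complement view: instead of growing the heavy side, find the longest
--     # *light* ascending prefix whose doubled sum stays below the total and
--     # drop it; the remaining suffix is the answer, already in ascending order.
--     asc = sorted(arr)
--     total = sum(asc)
--     s = 0
--     cut = 0
--     for j, x in enumerate(asc):
--         if 2 * s < total:
--             cut = j
--         s += x
--     return asc[cut:]
-- ===== Notes on version B (the rewrite author's own statement) =====
-- stated objective: alternative
-- what changed: Instead of sorting descending and growing the heavy subset until it outweighs the rest (then re-sorting it), B sorts ascending once and in a single forward pass finds the longest light prefix whose doubled running sum stays below the total, returning the remaining suffix, which is already in ascending order.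
import Mathlib
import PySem

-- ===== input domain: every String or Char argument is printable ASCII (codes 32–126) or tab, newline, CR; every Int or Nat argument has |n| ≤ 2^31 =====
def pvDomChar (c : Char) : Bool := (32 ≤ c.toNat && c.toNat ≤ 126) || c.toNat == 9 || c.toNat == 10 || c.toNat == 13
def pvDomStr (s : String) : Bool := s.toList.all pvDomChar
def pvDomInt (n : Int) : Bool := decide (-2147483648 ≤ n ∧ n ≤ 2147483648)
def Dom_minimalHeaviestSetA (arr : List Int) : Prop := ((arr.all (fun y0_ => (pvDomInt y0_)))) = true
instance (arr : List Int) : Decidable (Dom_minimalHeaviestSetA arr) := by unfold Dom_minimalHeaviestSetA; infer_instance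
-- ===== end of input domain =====

-- B replaces A's grow-the-heavy-prefix-until-it-outweighs-then-resort by the complement
-- view: sort ascending once, find the longest light prefix whose doubled sum stays below
-- the total, and return the remaining suffix (alternative decomposition; same cost).
-- A sorts the argument list in place descending, B does not mutate it; the equivalence
-- proved here is about the return value.


-- ===== PORT A =====
-- the for-loop with break: state = (sum_A, subset_A)
def pvLoopA (total : Int) : List Int → Int → List Int → List Int
  | [], _, subA => subA
  | x :: xs, sA, subA =>
      let sA' := sA + x
      let subA' := subA ++ [x]
      if sA' > total - sA' then subA' else pvLoopA total xs sA' subA'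

def minimalHeaviestSetA (arr : List Int) : List Int :=
  let arr := PySem.List.sorted arr (fun x => x) true   -- arr.sort(reverse=True)
  let totalSum := arr.sum
  let subsetA := pvLoopA totalSum arr 0 []
  PySem.List.sorted subsetA (fun x => x) false          -- sorted(subset_A)

-- ===== PORT B =====
-- the single forward pass over asc: state = (s, j, cut), cut updated whenever 2*s < total
def pvScanCut : List Int → Int → Int → Nat → Nat → Nat
  | [], _, _, _, cut => cut
  | x :: xs, total, s, j, cut =>
      pvScanCut xs total (s + x) (j + 1) (if 2 * s < total then j else cut)

def minimalHeaviestSetA_alt (arr : List Int) : List Int :=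
  let asc := PySem.List.sorted arr (fun x => x) false   -- asc = sorted(arr)
  let total := asc.sum
  let cut := pvScanCut asc total 0 0 0
  PySem.List.slice asc (some (cut : Int)) none          -- asc[cut:]

-- ===== PRECONDITION & SPEC =====
def Spec_minimalHeaviestSetA (arr : List Int) (out : List Int) : Prop := out = minimalHeaviestSetA_alt arr
instance (arr : List Int) (out : List Int) : Decidable (Spec_minimalHeaviestSetA arr out) := by unfold Spec_minimalHeaviestSetA; infer_instance

-- ===== CLAIM (what is proved, stated in full; the proofs are below) =====
def Claim_equal_minimalHeaviestSetA : Prop := ∀ (arr : List Int), Dom_minimalHeaviestSetA arr → Spec_minimalHeaviestSetA arr (minimalHeaviestSetA arr)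

-- ===== LEMMAS AND PROOFS =====

-- proof-only: length of the prefix A keeps (position of the break, or the whole list)
def pvCutLen (total : Int) : Int → List Int → Nat
  | _, [] => 0
  | s, x :: xs => if 2 * (s + x) > total then 1 else 1 + pvCutLen total (s + x) xs

theorem pvLoopA_eq_take (total : Int) (l : List Int) : ∀ (s : Int) (acc : List Int),
    pvLoopA total l s acc = acc ++ l.take (pvCutLen total s l) := by
  induction l with
  | nil => intro s acc; simp [pvLoopA, pvCutLen]
  | cons x xs ih =>
      intro s acc
      simp only [pvLoopA, pvCutLen]
      by_cases h : 2 * (s + x) > total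
      · have h' : s + x > total - (s + x) := by omega
        simp [h, h']
      · have h' : ¬ (s + x > total - (s + x)) := by omega
        rw [Nat.add_comm 1]
        simp [h, h', ih, List.take_succ_cons]

-- A's cut length as a find? over indices: first i with 2*(s + sum of first i+1 elements) > total, else length
theorem pvCutLen_find (total : Int) (l : List Int) : ∀ (s : Int),
    pvCutLen total s l
      = (((List.range l.length).find?
            (fun i => decide (2 * (s + (l.take (i+1)).sum) > total))).map (· + 1)).getD l.length := by
  induction l with
  | nil => intro s; simp [pvCutLen]
  | cons x xs ih =>
      intro s
      simp only [pvCutLen, List.length_cons]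
      rw [List.range_succ_eq_map]
      by_cases h : 2 * (s + x) > total
      · rw [List.find?_cons_of_pos (by simp; omega)]
        simp [h]
      · rw [List.find?_cons_of_neg (by simp; omega), List.find?_map]
        have hcond : ((fun i => decide (2 * (s + ((x :: xs).take (i+1)).sum) > total)) ∘ Nat.succ)
            = (fun i => decide (2 * ((s + x) + (xs.take (i+1)).sum) > total)) := by
          funext i
          simp only [Function.comp, List.take_succ_cons, List.sum_cons, decide_eq_decide]
          omega
        rw [hcond, if_neg h, ih (s + x)]
        cases hfind : (List.range xs.length).find?
            (fun i => decide (2 * ((s + x) + (xs.take (i+1)).sum) > total)) <;>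
          simp <;> omega

-- B's scan as a last-wins fold over the filtered index range
theorem pvScanCut_foldl (l : List Int) : ∀ (total s : Int) (j c : Nat),
    pvScanCut l total s j c
      = ((List.range l.length).filter
            (fun i => decide (2 * (s + (l.take i).sum) < total))).foldl (fun _ i => j + i) c := by
  induction l with
  | nil => intro total s j c; simp [pvScanCut]
  | cons x xs ih =>
      intro total s j c
      simp only [pvScanCut, List.length_cons]
      rw [List.range_succ_eq_map, ih total (s + x) (j + 1)]
      have hcond : ((fun i => decide (2 * (s + ((x :: xs).take i).sum) < total)) ∘ Nat.succ)
          = (fun i => decide (2 * ((s + x) + (xs.take i).sum) < total)) := by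
        funext i
        simp only [Function.comp, List.take_succ_cons, List.sum_cons, decide_eq_decide]
        omega
      have hshift : ∀ (m : List Nat) (c' : Nat),
          (m.map Nat.succ).foldl (fun _ i => j + i) c' = m.foldl (fun _ i => (j + 1) + i) c' := by
        intro m
        induction m with
        | nil => intro c'; rfl
        | cons y ys ihy =>
            intro c'
            simp only [List.map_cons, List.foldl_cons, ihy]
            congr 1
            omega
      by_cases h : 2 * s < total
      · rw [List.filter_cons_of_pos (by simp; omega), List.filter_map, hcond,
          List.foldl_cons, hshift, if_pos h]
        simp
      · rw [List.filter_cons_of_neg (by simp; omega), List.filter_map, hcond, hshift, if_neg h]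

-- last-wins fold is getLast? with a default
theorem foldl_last (l : List Nat) : ∀ (c : Nat),
    l.foldl (fun _ i => i) c = l.getLast?.getD c := by
  induction l with
  | nil => intro c; rfl
  | cons x xs ih =>
      intro c
      simp only [List.foldl_cons, ih]
      cases hx : xs.getLast? with
      | none => rw [List.getLast?_eq_none_iff.mp hx]; rfl
      | some y =>
          cases xs with
          | nil => simp at hx
          | cons z zs =>
              rw [List.getLast?_cons_cons, hx]
              simp

-- find? respects predicates equal on the members
theorem find?_congr_mem {α : Type} (l : List α) (p q : α → Bool)
    (h : ∀ x ∈ l, p x = q x) : l.find? p = l.find? q := by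
  induction l with
  | nil => rfl
  | cons x xs ih =>
      rw [List.find?_cons, List.find?_cons, h x (by simp)]
      split
      · rfl
      · exact ih (fun y hy => h y (by simp [hy]))

-- find? over a reversed range, re-indexed
theorem find?_range_reverse (p : Nat → Bool) (n : Nat) :
    (List.range n).reverse.find? p
      = ((List.range n).find? (fun i => p (n - 1 - i))).map (fun i => n - 1 - i) := by
  induction n with
  | zero => rfl
  | succ m ih =>
      conv_lhs => rw [List.range_succ]
      conv_rhs => rw [List.range_succ_eq_map]
      simp only [List.reverse_append, List.reverse_cons, List.reverse_nil, List.nil_append,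
        List.singleton_append]
      by_cases hp : p m
      · rw [List.find?_cons_of_pos hp, List.find?_cons_of_pos (by simpa using hp)]
        simp
      · rw [List.find?_cons_of_neg hp, List.find?_cons_of_neg (by simpa using hp),
          List.find?_map, ih]
        have hcond : ((fun i => p (m + 1 - 1 - i)) ∘ Nat.succ) = (fun i => p (m - 1 - i)) := by
          funext i
          simp only [Function.comp]
          congr 1
          omega
        rw [hcond]
        cases hf : (List.range m).find? (fun i => p (m - 1 - i)) with
        | none => simp
        | some i =>
            have hi : i < m := List.mem_range.mp (List.mem_of_find?_eq_some hf)
            simp only [Option.map_some]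
            congr 1
            omega

-- sorting a nonincreasing list (by identity) is just reversing it
theorem sorted_of_antitone (l : List Int) (h : l.Pairwise (fun a b => b ≤ a)) :
    PySem.List.sorted l (fun x => x) false = l.reverse := by
  apply PySem.List.sorted_id_eq_of_perm_of_pairwise
  · exact List.reverse_perm l
  · rw [List.pairwise_reverse]
    exact h

-- ascending sort is the reverse of the descending sort (identity key)
theorem asc_eq_desc_reverse (arr : List Int) :
    PySem.List.sorted arr (fun x => x) false = (PySem.List.sorted arr (fun x => x) true).reverse := by
  apply PySem.List.sorted_id_eq_of_perm_of_pairwise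
  · exact (List.reverse_perm _).trans (PySem.List.sorted_perm arr (fun x => x) true)
  · rw [List.pairwise_reverse]
    exact PySem.List.sorted_pairwise_rev arr (fun x => x)

theorem minimalHeaviestSetA_eq (arr : List Int) :
    minimalHeaviestSetA arr = minimalHeaviestSetA_alt arr := by
  simp only [minimalHeaviestSetA, minimalHeaviestSetA_alt]
  rw [pvLoopA_eq_take, List.nil_append,
    sorted_of_antitone _ ((PySem.List.sorted_pairwise_rev arr (fun x => x)).take),
    pvCutLen_find, asc_eq_desc_reverse, pvScanCut_foldl]
  set desc := PySem.List.sorted arr (fun x => x) true with hdesc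
  simp only [List.sum_reverse, List.length_reverse]
  have hzero : (fun (_ i : Nat) => 0 + i) = (fun (_ : Nat) (i : Nat) => i) := by
    funext a i
    omega
  rw [hzero, foldl_last, ← List.head?_reverse, ← List.filter_reverse, List.head?_filter,
    find?_range_reverse]
  have hcond : (List.range desc.length).find?
        (fun i => (fun i => decide (2 * (0 + ((desc.reverse.take i).sum)) < desc.sum)) (desc.length - 1 - i))
      = (List.range desc.length).find? (fun i => decide (2 * (0 + ((desc.take (i+1)).sum)) > desc.sum)) := by
    apply find?_congr_mem
    intro i hi
    have hi' : i < desc.length := List.mem_range.mp hi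
    have h1 : desc.reverse.take (desc.length - 1 - i) = (desc.drop (i + 1)).reverse := by
      rw [List.take_reverse, show desc.length - (desc.length - 1 - i) = i + 1 from by omega]
    simp only [h1, List.sum_reverse, decide_eq_decide]
    have hsplit : (desc.take (i+1)).sum + (desc.drop (i+1)).sum = desc.sum := by
      rw [← List.sum_append, List.take_append_drop]
    omega
  rw [hcond]
  cases hf : (List.range desc.length).find? (fun i => decide (2 * (0 + ((desc.take (i+1)).sum)) > desc.sum)) with
  | none =>
      simp only [Option.map_none, Option.getD_none]
      rw [PySem.List.slice_from_natCast, List.drop_zero, List.take_length]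
  | some i =>
      have hi : i < desc.length := List.mem_range.mp (List.mem_of_find?_eq_some hf)
      simp only [Option.map_some, Option.getD_some]
      rw [PySem.List.slice_from_natCast, List.drop_reverse,
        show desc.length - (desc.length - 1 - i) = i + 1 from by omega]

-- ===== VERDICT (by name: the statement is the Claim_ definition above) =====
theorem minimalHeaviestSetA_spec : Claim_equal_minimalHeaviestSetA := by
  intro arr _
  exact minimalHeaviestSetA_eq arr
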